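-- pv_equiv track=rewrite | github.com/terrafirma2021/Yamaha-K-line-Tool | Sr formatter 6 byte wide.py | format_into_groups
-- ===== SOURCE A (Python) =====
-- def format_into_groups(filtered_lines):
--     formatted_lines = []
--     buffer = []
--     found_first_group_start = False  # Flag to indicate when we've found the first "01"
--
--     for line in filtered_lines:
--         if not found_first_group_start:
--             if line == "01":  # Look for the first "01" to start grouping
--                 found_first_group_start = True
--                 buffer.append(line)
--             else:  # If it's before the first "01", it's incomplete
--                 formatted_lines.append(line)
--         else:
--             buffer.append(line)
--             if len(buffer) == 6:  # If buffer size is 6, it's a complete group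
--                 formatted_lines.append(' '.join(buffer))
--                 buffer = []  # Reset for the next group
--
--     # Append any remaining incomplete group at the end
--     if buffer:
--         formatted_lines.append(' '.join(buffer))
--
--     return formatted_lines
-- ===== SOURCE B (Python) =====
-- def format_into_groups(filtered_lines):
--     lines = list(filtered_lines)
--     if "01" not in lines:
--         return lines
--     i = lines.index("01")
--     result = lines[:i]
--     rest = lines[i:]
--     while rest:
--         result.append(' '.join(rest[:6]))
--         rest = rest[6:]
--     return result
-- ===== Notes on version B (the rewrite author's own statement) =====
-- stated objective: simpler
-- what changed: Replaces the streaming flag+buffer state machine with locate-the-first-'01'-then-slice: keep the prefix verbatim and join consecutive 6-slices of the suffix.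
import Mathlib
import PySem

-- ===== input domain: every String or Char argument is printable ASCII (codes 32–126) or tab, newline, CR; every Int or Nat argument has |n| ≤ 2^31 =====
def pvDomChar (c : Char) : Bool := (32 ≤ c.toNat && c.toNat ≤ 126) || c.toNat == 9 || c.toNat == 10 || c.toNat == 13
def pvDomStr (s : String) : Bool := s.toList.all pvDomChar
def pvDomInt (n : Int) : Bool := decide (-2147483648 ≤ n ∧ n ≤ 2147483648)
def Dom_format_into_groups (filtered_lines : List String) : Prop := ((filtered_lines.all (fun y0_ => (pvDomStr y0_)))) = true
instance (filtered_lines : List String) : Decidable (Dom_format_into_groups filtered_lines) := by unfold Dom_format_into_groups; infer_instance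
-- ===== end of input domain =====

-- B replaces A's streaming flag+buffer state machine with locate-first-"01"-then-chunk-into-6-slices (same output, proved equal on Dom).

-- ===== PORT A =====
-- state = (formatted_lines, buffer, found_first_group_start)
def fmtStep (st : List String × List String × Bool) (line : String) : List String × List String × Bool :=
  match st with
  | (formatted, buffer, found) =>
    if !found then
      if line == "01" then (formatted, buffer ++ [line], true)
      else (formatted ++ [line], buffer, found)
    else
      let buffer := buffer ++ [line]
      if buffer.length == 6 then (formatted ++ [PySem.Str.join " " buffer], [], found)
      else (formatted, buffer, found)

def format_into_groups (filtered_lines : List String) : List String :=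
  match filtered_lines.foldl fmtStep ([], [], false) with
  | (formatted, buffer, _) =>
    if buffer ≠ [] then formatted ++ [PySem.Str.join " " buffer] else formatted

-- ===== PORT B =====
-- the while-loop over `rest`: join the first 6, recurse on the rest
def chunkJoin6 (rest : List String) : List String :=
  match rest with
  | [] => []
  | x :: xs => PySem.Str.join " " ((x :: xs).take 6) :: chunkJoin6 ((x :: xs).drop 6)
  termination_by rest.length
  decreasing_by simp

def format_into_groups_alt (filtered_lines : List String) : List String :=
  match PySem.List.index? filtered_lines "01" with
  | none => filtered_lines
  | some i => filtered_lines.take i ++ chunkJoin6 (filtered_lines.drop i)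

-- ===== PRECONDITION & SPEC =====
def Spec_format_into_groups (filtered_lines : List String) (out : List String) : Prop := out = format_into_groups_alt filtered_lines
instance (filtered_lines : List String) (out : List String) : Decidable (Spec_format_into_groups filtered_lines out) := by unfold Spec_format_into_groups; infer_instance

-- ===== CLAIM =====
def Claim_equal_format_into_groups : Prop := ∀ (filtered_lines : List String), Dom_format_into_groups filtered_lines → Spec_format_into_groups filtered_lines (format_into_groups filtered_lines)

-- ===== LEMMAS AND PROOFS =====
def fmtFinish (st : List String × List String × Bool) : List String :=
  match st with
  | (formatted, buffer, _) =>
    if buffer ≠ [] then formatted ++ [PySem.Str.join " " buffer] else formatted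

theorem chunkJoin6_nil : chunkJoin6 [] = [] := by
  rw [chunkJoin6.eq_def]

theorem chunkJoin6_cons (x : String) (xs : List String) :
    chunkJoin6 (x :: xs) = PySem.Str.join " " ((x :: xs).take 6) :: chunkJoin6 ((x :: xs).drop 6) := by
  rw [chunkJoin6.eq_def]

theorem chunkJoin6_short (l : List String) (h0 : l ≠ []) (h6 : l.length ≤ 6) :
    chunkJoin6 l = [PySem.Str.join " " l] := by
  cases l with
  | nil => exact absurd rfl h0
  | cons x xs =>
    rw [chunkJoin6_cons]
    have h1 : (x :: xs).take 6 = x :: xs := List.take_of_length_le h6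
    have h2 : (x :: xs).drop 6 = [] := List.drop_of_length_le h6
    simp [h1, h2, chunkJoin6_nil]

theorem chunkJoin6_six (l ys : List String) (h6 : l.length = 6) :
    chunkJoin6 (l ++ ys) = PySem.Str.join " " l :: chunkJoin6 ys := by
  cases l with
  | nil => simp at h6
  | cons x xs =>
    have : (x :: xs) ++ ys = x :: (xs ++ ys) := rfl
    rw [this, chunkJoin6_cons]
    have h1 : (x :: (xs ++ ys)).take 6 = x :: xs := by
      have : x :: (xs ++ ys) = (x :: xs) ++ ys := rfl
      rw [this, List.take_append_of_le_length (le_of_eq h6.symm), List.take_of_length_le (le_of_eq h6)]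
    have h2 : (x :: (xs ++ ys)).drop 6 = ys := by
      have : x :: (xs ++ ys) = (x :: xs) ++ ys := rfl
      rw [this, ← h6, List.drop_left]
    rw [h1, h2]

-- the "found" phase: buffer b (length < 6) plus remaining lines ys chunk exactly as chunkJoin6 (b ++ ys)
theorem phase2 (ys : List String) : ∀ (f b : List String), b.length < 6 →
    fmtFinish (ys.foldl fmtStep (f, b, true)) = f ++ chunkJoin6 (b ++ ys) := by
  induction ys with
  | nil =>
    intro f b hb
    cases b with
    | nil => simp [fmtFinish, chunkJoin6_nil]
    | cons x xs =>
      simp only [List.foldl_nil, fmtFinish, List.append_nil]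
      rw [chunkJoin6_short _ (by simp) (by omega)]
      simp
  | cons y ys ih =>
    intro f b hb
    simp only [List.foldl_cons]
    by_cases h6 : (b ++ [y]).length = 6
    · have hstep : fmtStep (f, b, true) y = (f ++ [PySem.Str.join " " (b ++ [y])], [], true) := by
        simp [fmtStep, h6]
      rw [hstep, ih _ _ (by simp)]
      have hcons : b ++ y :: ys = (b ++ [y]) ++ ys := by simp
      rw [hcons, chunkJoin6_six _ _ h6]
      simp
    · have h5 : ¬ b.length = 5 := by intro h; exact h6 (by simp [h])
      have hstep : fmtStep (f, b, true) y = (f, b ++ [y], true) := by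
        simp [fmtStep, h5]
      rw [hstep, ih _ _ (by simp at h6 ⊢; omega)]
      simp

-- the scanning phase: before any "01", lines pass through; at the first "01" phase2 takes over
theorem phase1 (xs : List String) : ∀ (f : List String),
    fmtFinish (xs.foldl fmtStep (f, [], false)) = f ++ format_into_groups_alt xs := by
  induction xs with
  | nil => intro f; simp [fmtFinish, format_into_groups_alt, PySem.List.index?_eq_idxOf?, List.idxOf?]
  | cons x xs ih =>
    intro f
    by_cases hx : x = "01"
    · subst hx
      simp only [List.foldl_cons]
      have hstep : fmtStep (f, [], false) "01" = (f, [("01" : String)], true) := by simp [fmtStep]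
      rw [hstep, phase2 xs f ["01"] (by simp)]
      unfold format_into_groups_alt
      rw [PySem.List.index?_cons_self]
      simp
    · simp only [List.foldl_cons]
      have hstep : fmtStep (f, [], false) x = (f ++ [x], [], false) := by simp [fmtStep, hx]
      rw [hstep, ih]
      have hidx := PySem.List.index?_cons_of_ne (xs := xs) (v := "01") hx
      unfold format_into_groups_alt
      rw [hidx]
      cases h : PySem.List.index? xs "01" with
      | none => simp
      | some i => simp [List.take_succ_cons, List.drop_succ_cons]

-- ===== VERDICT =====
theorem format_into_groups_spec : Claim_equal_format_into_groups := by
  intro xs _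
  unfold Spec_format_into_groups
  have := phase1 xs []
  simpa [format_into_groups, fmtFinish] using this
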